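-- pv_equiv track=rewrite | github.com/windtara0619/tpu-inference | tpu_inference/offload/tpu_offload_connector.py | _decompose_into_buckets
-- ===== SOURCE A (Python) =====
-- BLOCK_SIZE_BUCKETS = [1, 2, 4, 8, 16, 32, 64]
--
-- def _decompose_into_buckets(block_ids: list[int]) -> list[list[int]]:
--     """
--     Decomposes a number into a sum of numbers from the BLOCK_SIZE_BUCKETS
--     list using a greedy approach.
--     Return:
--         a list of block_id bucks
--     """
--     sorted_buckets = sorted(BLOCK_SIZE_BUCKETS, reverse=True)
--     decomposed_blocks = []
--     offset = 0
--     remaining = len(block_ids)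
--
--     while remaining > 0:
--         for bucket_size in sorted_buckets:
--             if remaining >= bucket_size:
--                 decomposed_blocks.append(block_ids[offset:offset +
--                                                    bucket_size])
--                 offset += bucket_size
--                 remaining -= bucket_size
--                 break
--         else:
--             # This should not happen if 1 is in the buckets
--             raise ValueError("Could not decompose with given buckets.")
--     return decomposed_blocks
-- ===== SOURCE B (Python) =====
-- def _decompose_into_buckets(block_ids: list[int]) -> list[list[int]]:
--     n = len(block_ids)
--     sizes = [64] * (n // 64) + [b for b in (32, 16, 8, 4, 2, 1) if n % 64 & b]
--     out = []
--     off = 0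
--     for s in sizes:
--         out.append(block_ids[off:off + s])
--         off += s
--     return out
-- ===== Notes on version B (the rewrite author's own statement) =====
-- stated objective: simpler
-- what changed: Instead of a while-loop that rescans the 7 descending buckets to pick each chunk, B computes the chunk-size sequence in closed form from n = len(block_ids) (n//64 copies of 64, then the set bits of n%64 in descending order) and slices once per size.
import Mathlib
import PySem

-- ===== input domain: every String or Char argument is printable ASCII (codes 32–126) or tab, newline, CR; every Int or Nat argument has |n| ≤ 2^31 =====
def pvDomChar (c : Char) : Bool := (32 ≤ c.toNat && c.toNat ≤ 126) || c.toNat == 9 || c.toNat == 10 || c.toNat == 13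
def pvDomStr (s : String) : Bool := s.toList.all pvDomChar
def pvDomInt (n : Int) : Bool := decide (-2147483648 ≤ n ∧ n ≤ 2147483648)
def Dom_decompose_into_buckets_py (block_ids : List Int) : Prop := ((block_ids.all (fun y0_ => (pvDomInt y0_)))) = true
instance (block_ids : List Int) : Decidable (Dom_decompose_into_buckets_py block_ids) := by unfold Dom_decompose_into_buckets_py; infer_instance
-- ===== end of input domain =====

-- B computes the chunk-size sequence in closed form from the length (n//64 copies of 64, then the set bits of n%64 descending) instead of A's per-chunk rescan of the bucket list; same return value, no mutation.


-- ===== PORT A =====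
def goA (l : List Int) (off remaining : Nat) : List (List Int) :=
  -- while remaining > 0: for bucket_size in [64,32,16,8,4,2,1] (sorted BLOCK_SIZE_BUCKETS, reverse):
  -- the first bucket_size ≤ remaining is taken; the for-else raise is unreachable since 1 is a bucket.
  if remaining = 0 then []
  else if 64 ≤ remaining then
    PySem.List.slice l (some (off : Int)) (some ((off + 64 : Nat) : Int)) :: goA l (off + 64) (remaining - 64)
  else if 32 ≤ remaining then
    PySem.List.slice l (some (off : Int)) (some ((off + 32 : Nat) : Int)) :: goA l (off + 32) (remaining - 32)
  else if 16 ≤ remaining then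
    PySem.List.slice l (some (off : Int)) (some ((off + 16 : Nat) : Int)) :: goA l (off + 16) (remaining - 16)
  else if 8 ≤ remaining then
    PySem.List.slice l (some (off : Int)) (some ((off + 8 : Nat) : Int)) :: goA l (off + 8) (remaining - 8)
  else if 4 ≤ remaining then
    PySem.List.slice l (some (off : Int)) (some ((off + 4 : Nat) : Int)) :: goA l (off + 4) (remaining - 4)
  else if 2 ≤ remaining then
    PySem.List.slice l (some (off : Int)) (some ((off + 2 : Nat) : Int)) :: goA l (off + 2) (remaining - 2)
  else if 1 ≤ remaining then
    PySem.List.slice l (some (off : Int)) (some ((off + 1 : Nat) : Int)) :: goA l (off + 1) (remaining - 1)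
  else []  -- Python: raise ValueError — unreachable (remaining > 0 and 1 is a bucket)
  termination_by remaining
  decreasing_by all_goals omega

-- B changes only the chunk-size computation (closed form); proved equal to A below.
def decompose_into_buckets_py (block_ids : List Int) : List (List Int) :=
  goA block_ids 0 block_ids.length

-- ===== PORT B =====
def sizesB (n : Nat) : List Nat :=
  List.replicate (n / 64) 64 ++ ([32, 16, 8, 4, 2, 1].filter (fun b => n % 64 &&& b ≠ 0))

def chunksB (l : List Int) (off : Nat) : List Nat → List (List Int)
  | [] => []
  | s :: ss => PySem.List.slice l (some (off : Int)) (some ((off + s : Nat) : Int)) :: chunksB l (off + s) ss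

def decompose_into_buckets_py_alt (block_ids : List Int) : List (List Int) :=
  chunksB block_ids 0 (sizesB block_ids.length)

-- ===== PRECONDITION & SPEC =====
def Spec_decompose_into_buckets_py (block_ids : List Int) (out : List (List Int)) : Prop := out = decompose_into_buckets_py_alt block_ids
instance (block_ids : List Int) (out : List (List Int)) : Decidable (Spec_decompose_into_buckets_py block_ids out) := by unfold Spec_decompose_into_buckets_py; infer_instance

-- ===== CLAIM (what is proved, stated in full; the proofs are below) =====
def Claim_equal_decompose_into_buckets_py : Prop := ∀ (block_ids : List Int), Dom_decompose_into_buckets_py block_ids → Spec_decompose_into_buckets_py block_ids (decompose_into_buckets_py block_ids)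

-- ===== LEMMAS AND PROOFS =====

lemma sizesB_ge64 (r : Nat) (h : 64 ≤ r) : sizesB r = 64 :: sizesB (r - 64) := by
  unfold sizesB
  have h1 : r / 64 = (r - 64) / 64 + 1 := by omega
  have h2 : r % 64 = (r - 64) % 64 := by omega
  rw [h1, h2, List.replicate_succ, List.cons_append]

def chooseB (r : Nat) : Nat :=
  if 64 ≤ r then 64 else if 32 ≤ r then 32 else if 16 ≤ r then 16
  else if 8 ≤ r then 8 else if 4 ≤ r then 4 else if 2 ≤ r then 2 else 1

lemma sizesB_step (r : Nat) (h : 1 ≤ r) : sizesB r = chooseB r :: sizesB (r - chooseB r) := by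
  by_cases h64 : 64 ≤ r
  · rw [show chooseB r = 64 from by simp [chooseB, h64]]
    exact sizesB_ge64 r h64
  · have hlt : r < 64 := by omega
    have key : ∀ r, r < 64 → 1 ≤ r → sizesB r = chooseB r :: sizesB (r - chooseB r) := by decide
    exact key r hlt h

lemma goA_eq (r : Nat) (l : List Int) (off : Nat) : goA l off r = chunksB l off (sizesB r) := by
  induction r using Nat.strong_induction_on generalizing off with
  | _ r ih =>
    by_cases h0 : r = 0
    · subst h0
      rw [goA, show sizesB 0 = [] from by decide]
      simp [chunksB]
    · rw [goA, sizesB_step r (by omega), chunksB]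
      split_ifs with h1 h2 h3 h4 h5 h6 h7
      · rw [show chooseB r = 64 from by simp [chooseB, h1], ih (r - 64) (by omega)]
      · rw [show chooseB r = 32 from by simp [chooseB, h1, h2], ih (r - 32) (by omega)]
      · rw [show chooseB r = 16 from by simp [chooseB, h1, h2, h3], ih (r - 16) (by omega)]
      · rw [show chooseB r = 8 from by simp [chooseB, h1, h2, h3, h4], ih (r - 8) (by omega)]
      · rw [show chooseB r = 4 from by simp [chooseB, h1, h2, h3, h4, h5], ih (r - 4) (by omega)]
      · rw [show chooseB r = 2 from by simp [chooseB, h1, h2, h3, h4, h5, h6], ih (r - 2) (by omega)]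
      · rw [show chooseB r = 1 from by simp [chooseB, h1, h2, h3, h4, h5, h6], ih (r - 1) (by omega)]
      · omega

-- ===== VERDICT (by name: the statement is the Claim_ definition above) =====
theorem decompose_into_buckets_py_spec : Claim_equal_decompose_into_buckets_py := by
  intro block_ids _
  show decompose_into_buckets_py block_ids = decompose_into_buckets_py_alt block_ids
  exact goA_eq block_ids.length block_ids 0
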